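-- pv_equiv track=rewrite | github.com/WJD1005/2048Robot | AI版/greedy.py | try_move_right
-- ===== SOURCE A (Python) =====
-- import copy
--
-- def try_move_right(map):
--     """
--     尝试向右移动，计算总分数。
--     :param map: 地图
--     :return: 是否有效, 移动获得的分数
--     """
--     is_valid = False
--     score = 0
--     map_temp = copy.deepcopy(map)  # 副本
--     # 提取一行
--     for i in range(4):
--         # 遍历前方块
--         for j in range(3, 0, -1):
--             # 寻找下一个非0
--             for next in range(j - 1, -1, -1):
--                 if map_temp[i][next] != 0:
--                     # 如果前方块是0则移动，并继续往后看
--                     if map_temp[i][j] == 0: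
--                         map_temp[i][j] = map_temp[i][next]
--                         map_temp[i][next] = 0
--                         is_valid = True
--                     # 如果和前方块相等则合并并跳出不再找下一个避免重复合并
--                     elif map_temp[i][j] == map_temp[i][next]:
--                         map_temp[i][j] *= 2
--                         map_temp[i][next] = 0
--                         score += map_temp[i][j]
--                         is_valid = True
--                         break
--                     # 如果和前方块不相等则直接跳出
--                     else:
--                         break
--             # 后面没有非0了这行可以结束了
--             else:
--                 break
--     score += adjacent_check(map_temp)  # 计算相邻方块对分数
--     return is_valid, score
--
-- def adjacent_check(map):
--     """
--     检查相邻方块配对，一对相邻方块加方块数字的分数（合成的一半）。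
--     :param map: 地图
--     :return: 相邻方块对分数
--     """
--     score = 0
--     # 检查行有无2个相邻相同方块
--     for i in range(4):
--         j = 0
--         while j < 3:
--             if map[i][j] == map[i][j + 1]:
--                 score += map[i][j]
--                 j += 2  # 两两配对都跳过
--             else:
--                 j += 1
--     # 检查列有无2个相邻相同方块
--     for j in range(4):
--         i = 0
--         while i < 3:
--             if map[i][j] == map[i + 1][j]:
--                 score += map[i][j]
--                 i += 2  # 两两配对都跳过
--             else:
--                 i += 1
--     return score
-- ===== SOURCE B (Python) =====
-- def _merge_rev(rev):
--     # rev: a row's nonzero tiles listed right-to-left; merge equal adjacent pairs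
--     # from the right; returns (merged tiles right-to-left, score gained)
--     if len(rev) >= 2 and rev[0] == rev[1]:
--         m, s = _merge_rev(rev[2:])
--         return [rev[0] * 2] + m, s + rev[0] * 2
--     if rev:
--         m, s = _merge_rev(rev[1:])
--         return [rev[0]] + m, s
--     return [], 0
--
-- def _pair_score(line):
--     # score of non-overlapping adjacent equal pairs, scanned left to right
--     if len(line) >= 2 and line[0] == line[1]:
--         return line[0] + _pair_score(line[2:])
--     if line:
--         return _pair_score(line[1:])
--     return 0
--
-- def try_move_right(map):
--     is_valid = False
--     score = 0
--     new_grid = []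
--     for i in range(4):
--         row = [map[i][j] for j in range(4)]
--         merged_rev, s = _merge_rev([x for x in reversed(row) if x != 0])
--         new_row = [0] * (4 - len(merged_rev)) + merged_rev[::-1]
--         score += s
--         if new_row != row:
--             is_valid = True
--         new_grid.append(new_row)
--     cols = [[r[j] for r in new_grid] for j in range(4)]
--     adj = sum(_pair_score(r) for r in new_grid) + sum(_pair_score(c) for c in cols)
--     return is_valid, score + adj
-- ===== Notes on version B (the rewrite author's own statement) =====
-- stated objective: simpler
-- what changed: A simulates the move by triple-nested index loops mutating a grid copy in place with break/for-else control; B processes each row once by compacting its nonzero tiles and merging equal adjacent pairs from the right, reads validity off as 'the row changed', and scores adjacency via a recursive pair scan over rows and columns.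
import Mathlib
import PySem

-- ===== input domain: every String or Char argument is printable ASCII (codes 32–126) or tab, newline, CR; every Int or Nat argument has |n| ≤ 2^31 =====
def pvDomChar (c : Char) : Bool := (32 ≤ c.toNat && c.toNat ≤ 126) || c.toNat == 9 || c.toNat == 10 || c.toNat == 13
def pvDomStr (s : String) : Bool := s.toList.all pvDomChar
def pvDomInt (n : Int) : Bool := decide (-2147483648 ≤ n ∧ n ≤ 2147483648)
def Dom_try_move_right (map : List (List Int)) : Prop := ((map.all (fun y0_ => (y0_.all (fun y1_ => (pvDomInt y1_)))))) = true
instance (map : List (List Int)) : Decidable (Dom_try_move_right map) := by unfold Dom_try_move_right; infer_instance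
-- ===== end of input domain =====

-- B replaces A's in-place triple-nested index loops by a per-row compact-and-merge-from-the-right
-- pass over the nonzero tiles, with validity read off as "the row changed" (objective: simpler).

-- ===== PORT A =====
-- all indices used below are nonnegative and in range under Pre_, so getD/set are exact
def rget (r : List Int) (j : Nat) : Int := r.getD j 0
def rset (r : List Int) (j : Nat) (v : Int) : List Int := r.set j v

-- 'for next in range(j-1, -1, -1)' with its break/else; c+1 iterations left, next = c;
-- result's last component = True iff the loop was exhausted (for-else fires → break j loop)
def innerA (j : Nat) : Nat → List Int × Bool × Int → List Int × Bool × Int × Bool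
  | 0, (r, v, s) => (r, v, s, true)
  | c+1, (r, v, s) =>
      if rget r c ≠ 0 then
        if rget r j = 0 then
          innerA j c (rset (rset r j (rget r c)) c 0, true, s)
        else if rget r j = rget r c then
          let r2 := rset (rset r j (rget r j * 2)) c 0
          (r2, true, s + rget r2 j, false)
        else (r, v, s, false)
      else innerA j c (r, v, s)

-- 'for j in range(3, 0, -1)' with the for-else break
def jloopA : List Nat → List Int × Bool × Int → List Int × Bool × Int
  | [], st => st
  | j :: rest, (r, v, s) =>
      match innerA j j (r, v, s) with
      | (r', v', s', true) => (r', v', s')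
      | (r', v', s', false) => jloopA rest (r', v', s')

-- 'while j < 3' row/column scan of adjacent_check
def adjRowA (f : Nat → Int) (j : Nat) : Int :=
  if j < 3 then
    if f j = f (j + 1) then f j + adjRowA f (j + 2) else adjRowA f (j + 1)
  else 0
termination_by 3 - j

def adjacent_check (g : List (List Int)) : Int :=
  ([0, 1, 2, 3].map (fun i => adjRowA (fun j => rget (g.getD i []) j) 0)).sum
  + ([0, 1, 2, 3].map (fun j => adjRowA (fun i => rget (g.getD i []) j) 0)).sum

def try_move_right (map : List (List Int)) : Bool × Int :=
  let st := [0, 1, 2, 3].foldl (fun (st : List (List Int) × Bool × Int) i =>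
      match st with
      | (g, v, s) =>
        match jloopA [3, 2, 1] (g.getD i [], v, s) with
        | (r', v', s') => (g.set i r', v', s')) (map, false, 0)
  match st with
  | (g, v, s) => (v, s + adjacent_check g)

-- ===== PORT B =====
def mergeRevB : List Int → List Int × Int
  | a :: b :: rest =>
      if a = b then
        let (m, s) := mergeRevB rest
        (a * 2 :: m, s + a * 2)
      else
        let (m, s) := mergeRevB (b :: rest)
        (a :: m, s)
  | [a] => ([a], 0)
  | [] => ([], 0)

def pairScoreB : List Int → Int
  | a :: b :: rest => if a = b then a + pairScoreB rest else pairScoreB (b :: rest)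
  | _ => 0

def rowB (row : List Int) : List Int × Int :=
  match mergeRevB (row.reverse.filter (fun x => x != 0)) with
  | (m, s) => (List.replicate (4 - m.length) 0 ++ m.reverse, s)

-- indices below are in range under Pre_, so getD is exact
def bget (g : List (List Int)) (i j : Nat) : Int := (g.getD i []).getD j 0

def try_move_right_alt (map : List (List Int)) : Bool × Int :=
  let st := [0, 1, 2, 3].foldl (fun (st : Bool × Int × List (List Int)) i =>
      match st with
      | (v, s, g) =>
        let row4 := [bget map i 0, bget map i 1, bget map i 2, bget map i 3]
        match rowB row4 with
        | (nr, gain) => (v || decide (nr ≠ row4), s + gain, g ++ [nr])) (false, 0, [])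
  match st with
  | (v, s, g) =>
    let cols := (List.range 4).map (fun j => g.map (fun r => r.getD j 0))
    (v, s + ((g.map pairScoreB).sum + (cols.map pairScoreB).sum))

-- ===== PRECONDITION & SPEC =====
-- Pre_ is exactly A's domain: A indexes map[i][j] for all i, j in 0..3 and raises IndexError otherwise.
def Pre_try_move_right (map : List (List Int)) : Prop :=
  4 ≤ map.length ∧ ∀ r ∈ map.take 4, 4 ≤ r.length
instance (map : List (List Int)) : Decidable (Pre_try_move_right map) := by
  unfold Pre_try_move_right; infer_instance

def pvWitness_try_move_right : List (List Int) :=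
  [[2, 2, 0, 4], [0, 0, 2, 2], [4, 0, 4, 8], [0, 0, 0, 0]]

def Spec_try_move_right (map : List (List Int)) (out : Bool × Int) : Prop := out = try_move_right_alt map
instance (map : List (List Int)) (out : Bool × Int) : Decidable (Spec_try_move_right map out) := by unfold Spec_try_move_right; infer_instance

-- ===== CLAIM (what is proved, stated in full; the proofs are below) =====
def Claim_equal_try_move_right : Prop := ∀ (map : List (List Int)), Dom_try_move_right map → Pre_try_move_right map → Spec_try_move_right map (try_move_right map)

-- ===== LEMMAS AND PROOFS =====

lemma len4 {l : List Int} (h : l.length = 4) : ∃ a b c d, l = [a, b, c, d] := by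
  match l, h with
  | [a, b, c, d], _ => exact ⟨a, b, c, d, rfl⟩

lemma len4' {l : List Int} (h : 4 ≤ l.length) : ∃ a b c d t, l = a :: b :: c :: d :: t := by
  match l, h with
  | a :: b :: c :: d :: t, _ => exact ⟨a, b, c, d, t, rfl⟩

lemma mergeRevB_len_le (l : List Int) : (mergeRevB l).1.length ≤ l.length := by
  induction l using mergeRevB.induct <;> simp_all [mergeRevB] <;> omega

lemma rowB_len (a b c d : Int) : (rowB [a, b, c, d]).1.length = 4 := by
  have h := mergeRevB_len_le ([a, b, c, d].reverse.filter (fun x => x != 0))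
  have h2 : ([a, b, c, d].reverse.filter (fun x => x != 0)).length ≤ 4 := by
    have := List.length_filter_le (fun x => x != 0) ([a, b, c, d].reverse); simpa using this
  simp only [rowB]
  rcases hm : mergeRevB ([a, b, c, d].reverse.filter (fun x => x != 0)) with ⟨m, s⟩
  rw [hm] at h; dsimp at h
  simp only [List.length_append, List.length_replicate, List.length_reverse]
  omega

set_option maxHeartbeats 2000000 in
-- the per-row heart: A's j-loop equals B's compact-and-merge on any row of length ≥ 4
lemma rowA_eq (a b c d : Int) (t : List Int) (v : Bool) (s : Int) :
    jloopA [3, 2, 1] (a :: b :: c :: d :: t, v, s)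
      = ((rowB [a, b, c, d]).1 ++ t,
         v || decide ((rowB [a, b, c, d]).1 ≠ [a, b, c, d]),
         s + (rowB [a, b, c, d]).2) := by
  simp only [jloopA, innerA, rowB, rget, rset, List.getD, List.set,
    List.reverse, List.getElem?_cons_zero, List.getElem?_cons_succ]
  norm_num
  split_ifs <;> simp_all [mergeRevB] <;>
    (try (split_ifs <;> simp_all [mergeRevB])) <;>
    (try (split_ifs <;> simp_all [mergeRevB])) <;> (try omega) <;>
    (by_cases hd : d = 0 <;> simp_all [mergeRevB])

lemma adjRowA_eq_pair (f : Nat → Int) :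
    adjRowA f 0 = pairScoreB [f 0, f 1, f 2, f 3] := by
  rw [adjRowA, adjRowA, adjRowA, adjRowA, adjRowA]
  simp [pairScoreB]
  split_ifs <;> simp_all [adjRowA]

-- ===== VERDICT (by name: the statement is the Claim_ definition above) =====
theorem try_move_right_spec : Claim_equal_try_move_right := by
  intro map hdom hpre
  unfold Spec_try_move_right
  obtain ⟨hlen, hrows⟩ := hpre
  rcases map with _ | ⟨r0, _ | ⟨r1, _ | ⟨r2, _ | ⟨r3, rest⟩⟩⟩⟩ <;> simp at hlen
  obtain ⟨a0, b0, c0, d0, t0, rfl⟩ := len4' (hrows r0 (by simp))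
  obtain ⟨a1, b1, c1, d1, t1, rfl⟩ := len4' (hrows r1 (by simp))
  obtain ⟨a2, b2, c2, d2, t2, rfl⟩ := len4' (hrows r2 (by simp))
  obtain ⟨a3, b3, c3, d3, t3, rfl⟩ := len4' (hrows r3 (by simp))
  obtain ⟨p0, q0, u0, w0, hR0⟩ := len4 (rowB_len a0 b0 c0 d0)
  obtain ⟨p1, q1, u1, w1, hR1⟩ := len4 (rowB_len a1 b1 c1 d1)
  obtain ⟨p2, q2, u2, w2, hR2⟩ := len4 (rowB_len a2 b2 c2 d2)
  obtain ⟨p3, q3, u3, w3, hR3⟩ := len4 (rowB_len a3 b3 c3 d3)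
  simp only [try_move_right, try_move_right_alt, bget, List.foldl,
    List.getD_cons_zero, List.getD_cons_succ, List.set, rowA_eq,
    hR0, hR1, hR2, hR3, List.cons_append, List.nil_append]
  simp only [adjacent_check, rget, List.map, List.sum_cons, List.sum_nil,
    List.getD_cons_zero, List.getD_cons_succ, List.range, List.range.loop,
    adjRowA_eq_pair]
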